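-- pv_equiv track=rewrite | github.com/mmertc/Python-Labs | Lab3/Lab03_Q1.py | all_vowels
-- ===== SOURCE A (Python) =====
-- vowels = "aeoui"
--
-- def all_vowels(st):
--     tvowels = "aeoui"  #A dummy variable that contains all the vowels.
--     for i in st:
--         for j in vowels:
--             if i == j:    #For every vowel in the st, it deletes it from the tvowels.
--                 tvowels = tvowels.replace(j, "")
--     if tvowels == "": return True  #So at the end if there's no more undeleted char in the tvowels, all vowels exist.
--     else: return False
-- ===== SOURCE B (Python) =====
-- def all_vowels(st):
--     return set("aeoui").issubset(st)
-- ===== Notes on version B (the rewrite author's own statement) =====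
-- stated objective: idiomatic
-- what changed: Replaced A's nested loop with stateful in-place deletion from a vowel string by a single set-subset test of the vowel set against the characters of st.
import Mathlib
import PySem

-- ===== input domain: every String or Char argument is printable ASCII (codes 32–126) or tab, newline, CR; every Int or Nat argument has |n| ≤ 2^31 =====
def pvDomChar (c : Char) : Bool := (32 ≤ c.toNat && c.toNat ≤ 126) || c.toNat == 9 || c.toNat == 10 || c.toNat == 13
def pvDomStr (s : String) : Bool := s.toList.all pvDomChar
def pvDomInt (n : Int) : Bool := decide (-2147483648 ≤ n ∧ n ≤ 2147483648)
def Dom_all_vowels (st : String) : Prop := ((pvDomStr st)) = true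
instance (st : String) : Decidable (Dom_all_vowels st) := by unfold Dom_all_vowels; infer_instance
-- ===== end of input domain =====

-- B replaces A's nested loop with stateful string deletion by a single set-subset test (idiomatic).

-- ===== PORT A =====
-- module constant `vowels = "aeoui"`
def vowels : String := "aeoui"

def all_vowels (st : String) : Bool :=
  let tvowels : String :=
    st.toList.foldl
      (fun tvowels i =>
        vowels.toList.foldl
          (fun tvowels j =>
            if i == j then PySem.Str.replace tvowels (String.ofList [j]) "" else tvowels)
          tvowels)
      "aeoui"
  if tvowels == "" then true else false

-- ===== PORT B =====
def all_vowels_alt (st : String) : Bool :=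
  PySem.Set.issubset (PySem.Set.ofList "aeoui".toList) st.toList

-- ===== PRECONDITION & SPEC =====
def Spec_all_vowels (st : String) (out : Bool) : Prop := out = all_vowels_alt st
instance (st : String) (out : Bool) : Decidable (Spec_all_vowels st out) := by unfold Spec_all_vowels; infer_instance

-- ===== CLAIM (what is proved, stated in full; the proofs are below) =====
def Claim_equal_all_vowels : Prop := ∀ (st : String), Dom_all_vowels st → Spec_all_vowels st (all_vowels st)

-- ===== LEMMAS AND PROOFS =====

-- single-char replace-by-empty is a filter
lemma replace_go_single (j : Char) : ∀ (fuel : Nat) (l acc : List Char), l.length ≤ fuel →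
    PySem.Chars.replace.go [j] [] fuel l acc = acc.reverse ++ l.filter (fun c => !(c == j)) := by
  intro fuel
  induction fuel with
  | zero =>
    intro l acc h
    have hl : l = [] := List.eq_nil_of_length_eq_zero (Nat.le_zero.mp h)
    subst hl
    simp [PySem.Chars.replace.go]
  | succ n ih =>
    intro l acc h
    cases l with
    | nil => simp [PySem.Chars.replace.go]
    | cons c t =>
      have hlen : t.length ≤ n := by simpa using Nat.le_of_succ_le_succ h
      by_cases hc : c = j
      · subst hc
        have hpre : List.isPrefixOf [c] (c :: t) = true := by
          simp [List.isPrefixOf]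
        rw [PySem.Chars.replace.go]
        simp only [hpre, if_true]
        rw [ih (List.drop [c].length (c :: t)) ([].reverse ++ acc) (by simpa using hlen)]
        simp
      · have hpre : List.isPrefixOf [j] (c :: t) = false := by
          simp [List.isPrefixOf]
          exact fun hh => hc hh.symm
        rw [PySem.Chars.replace.go]
        simp only [hpre, Bool.false_eq_true, if_false]
        rw [ih t (c :: acc) hlen]
        simp [hc]

lemma replace_single (j : Char) (l : List Char) :
    PySem.Chars.replace l [j] [] = l.filter (fun c => !(c == j)) := by
  rw [PySem.Chars.replace]
  simp only [List.isEmpty_cons, Bool.false_eq_true, if_false]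
  simpa using replace_go_single j l.length l [] le_rfl

-- the inner loop over the vowel constant
lemma inner_eq (i : Char) (tv : String) :
    (vowels.toList.foldl
      (fun tvowels j =>
        if i == j then PySem.Str.replace tvowels (String.ofList [j]) "" else tvowels) tv).toList
    = if i ∈ ['a','e','o','u','i'] then tv.toList.filter (fun c => !(c == i)) else tv.toList := by
  have hv : vowels.toList = ['a','e','o','u','i'] := rfl
  rw [hv]
  by_cases ha : i = 'a'
  · subst ha; simp [List.foldl, replace_single]
  · by_cases he : i = 'e'
    · subst he; simp [List.foldl, replace_single]
    · by_cases ho : i = 'o'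
      · subst ho; simp [List.foldl, replace_single]
      · by_cases hu : i = 'u'
        · subst hu; simp [List.foldl, replace_single]
        · by_cases hi : i = 'i'
          · subst hi; simp [List.foldl, replace_single]
          · simp [List.foldl, ha, he, ho, hu, hi]

-- the outer loop as a filter, given the state only holds vowels
lemma outer_eq : ∀ (l : List Char) (tv : String),
    (∀ c ∈ tv.toList, c ∈ ['a','e','o','u','i']) →
    (l.foldl
      (fun tvowels i =>
        vowels.toList.foldl
          (fun tvowels j =>
            if i == j then PySem.Str.replace tvowels (String.ofList [j]) "" else tvowels)
          tvowels) tv).toList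
    = tv.toList.filter (fun c => !(l.contains c)) := by
  intro l
  induction l with
  | nil =>
    intro tv _
    simp
  | cons i t ih =>
    intro tv htv
    rw [List.foldl_cons]
    set tv' := vowels.toList.foldl
          (fun tvowels j =>
            if i == j then PySem.Str.replace tvowels (String.ofList [j]) "" else tvowels) tv with htv'
    have h1 : tv'.toList = if i ∈ ['a','e','o','u','i'] then tv.toList.filter (fun c => !(c == i)) else tv.toList := inner_eq i tv
    have htv'2 : ∀ c ∈ tv'.toList, c ∈ ['a','e','o','u','i'] := by
      intro c hc
      rw [h1] at hc
      split at hc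
      · exact htv c (List.mem_of_mem_filter hc)
      · exact htv c hc
    rw [ih tv' htv'2, h1]
    by_cases hmem : i ∈ ['a','e','o','u','i']
    · rw [if_pos hmem, List.filter_filter]
      apply List.filter_congr
      intro c _
      by_cases hci : c = i
      · subst hci; simp [List.contains_cons]
      · simp [List.contains_cons, hci, Bool.and_comm]
    · rw [if_neg hmem]
      apply List.filter_congr
      intro c hc
      have hne : c ≠ i := fun h => hmem (h ▸ htv c hc)
      simp [List.contains_cons, hne]

lemma allA_iff (st : String) : all_vowels st = true ↔ ∀ c ∈ ['a','e','o','u','i'], c ∈ st.toList := by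
  unfold all_vowels
  have hv5 : ("aeoui" : String).toList = ['a','e','o','u','i'] := rfl
  have h0 : ∀ c ∈ ("aeoui" : String).toList, c ∈ ['a','e','o','u','i'] := by
    rw [hv5]; exact fun c hc => hc
  have h := outer_eq st.toList "aeoui" h0
  have hfold : (if (st.toList.foldl
      (fun tvowels i =>
        vowels.toList.foldl
          (fun tvowels j =>
            if i == j then PySem.Str.replace tvowels (String.ofList [j]) "" else tvowels)
          tvowels) "aeoui") == "" then true else false) = true
      ↔ List.filter (fun c => !(st.toList.contains c)) ("aeoui" : String).toList = [] := by
    constructor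
    · intro hA
      split at hA
      · next heq =>
        have hs : (st.toList.foldl
            (fun tvowels i =>
              vowels.toList.foldl
                (fun tvowels j =>
                  if i == j then PySem.Str.replace tvowels (String.ofList [j]) "" else tvowels)
                tvowels) "aeoui") = "" := eq_of_beq heq
        rw [← h, hs]
        rfl
      · exact absurd hA (by simp)
    · intro hnil
      rw [hnil] at h
      have hs : (st.toList.foldl
          (fun tvowels i =>
            vowels.toList.foldl
              (fun tvowels j =>
                if i == j then PySem.Str.replace tvowels (String.ofList [j]) "" else tvowels)
              tvowels) "aeoui") = "" :=
        String.toList_inj.mp h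
      rw [hs]
      rfl
  rw [hfold, List.filter_eq_nil_iff, hv5]
  constructor
  · intro hall c hc
    simpa using hall c hc
  · intro hall c hc
    simpa using hall c hc

lemma allB_iff (st : String) : all_vowels_alt st = true ↔ ∀ c ∈ ['a','e','o','u','i'], c ∈ st.toList := by
  unfold all_vowels_alt
  rw [PySem.Set.issubset_iff]
  have h : PySem.Set.ofList ("aeoui" : String).toList = ['a','e','o','u','i'] := by decide
  rw [h]

-- ===== VERDICT (by name: the statement is the Claim_ definition above) =====
theorem all_vowels_spec : Claim_equal_all_vowels := by
  intro st _
  unfold Spec_all_vowels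
  rw [Bool.eq_iff_iff, allA_iff, allB_iff]
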